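-- pv_equiv track=rewrite | github.com/amulog/logdag | logdag/visual/edge_search.py | _renumber_clustering
-- ===== SOURCE A (Python) =====
-- from collections import defaultdict, Counter
--
-- def _renumber_clustering(labels):
--     clusters = defaultdict(list)
--     for ind, label in enumerate(labels):
--         clusters[label].append(ind)
--
--     iterable = sorted(clusters.items(),
--                       key=lambda x: x[1], reverse=False)
--     for cid, (label, members) in enumerate(iterable):
--         yield cid, members
-- ===== SOURCE B (Python) =====
-- def _renumber_clustering(labels):
--     clusters = {}
--     order = []
--     for ind, label in enumerate(labels):
--         if label in clusters:
--             clusters[label].append(ind)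
--         else:
--             clusters[label] = [ind]
--             order.append(label)
--     for cid, label in enumerate(order):
--         yield cid, clusters[label]
-- ===== Notes on version B (the rewrite author's own statement) =====
-- stated objective: alternative
-- what changed: Drops the sort entirely: a single pass records each label's first-appearance order in a separate list, which already equals the original's lexicographic-by-members sorted order because members lists are increasing and start at distinct first-occurrence indices.
import Mathlib
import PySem

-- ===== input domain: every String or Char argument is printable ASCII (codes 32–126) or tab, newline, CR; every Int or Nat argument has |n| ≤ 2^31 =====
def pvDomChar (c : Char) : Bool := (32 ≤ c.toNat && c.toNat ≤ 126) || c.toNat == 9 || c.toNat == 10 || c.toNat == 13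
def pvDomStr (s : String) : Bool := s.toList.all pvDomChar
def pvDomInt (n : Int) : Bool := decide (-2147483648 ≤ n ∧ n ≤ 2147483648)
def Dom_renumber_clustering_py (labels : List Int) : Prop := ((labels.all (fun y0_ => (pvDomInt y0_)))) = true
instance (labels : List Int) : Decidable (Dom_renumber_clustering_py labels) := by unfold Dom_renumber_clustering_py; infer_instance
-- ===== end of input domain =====

-- B replaces A's sort of clusters by member lists with a single pass that records
-- labels in first-appearance order (which provably equals A's sorted order).


-- ===== PORT A =====
def renumber_clustering_py (labels : List Int) : List (Int × List Int) :=
  let clusters := (PySem.List.enumerate labels).foldl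
      (fun d p => d.modify p.2 [] (fun xs => xs ++ [p.1]))
      (PySem.Dict.empty : PySem.Dict Int (List Int))
  let iterable := PySem.List.sorted clusters.items (fun x => x.2) false
  (PySem.List.enumerate iterable).map (fun p => (p.1, p.2.2))

-- ===== PORT B =====
def renumber_clustering_py_alt (labels : List Int) : List (Int × List Int) :=
  let st := (PySem.List.enumerate labels).foldl
      (fun (st : PySem.Dict Int (List Int) × List Int) p =>
        if st.1.contains p.2 then
          (st.1.modify p.2 [] (fun xs => xs ++ [p.1]), st.2)
        else
          (st.1.insert p.2 [p.1], st.2 ++ [p.2]))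
      (PySem.Dict.empty, [])
  (PySem.List.enumerate st.2).map (fun p => (p.1, st.1.getD p.2 []))

-- ===== PRECONDITION & SPEC =====
def Spec_renumber_clustering_py (labels : List Int) (out : List (Int × List Int)) : Prop := out = renumber_clustering_py_alt labels
instance (labels : List Int) (out : List (Int × List Int)) : Decidable (Spec_renumber_clustering_py labels out) := by unfold Spec_renumber_clustering_py; infer_instance

-- ===== CLAIM (what is proved, stated in full; the proofs are below) =====
def Claim_equal_renumber_clustering_py : Prop := ∀ (labels : List Int), Dom_renumber_clustering_py labels → Spec_renumber_clustering_py labels (renumber_clustering_py labels)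

-- ===== LEMMAS AND PROOFS =====

-- occurrence-index list of a value c in l, enumerated from s
def pvOcc (c : Int) (l : List Int) (s : Int) : List Int :=
  ((PySem.List.enumerate l s).filter (fun p => p.2 == c)).map (fun p => p.1)

-- first-occurrence dedup, structurally
def pvFo : List Int → List Int
  | [] => []
  | x :: xs => x :: (pvFo xs).filter (fun y => y != x)

theorem pvOcc_cons (c x : Int) (xs : List Int) (s : Int) :
    pvOcc c (x :: xs) s = if x = c then s :: pvOcc c xs (s+1) else pvOcc c xs (s+1) := by
  simp only [pvOcc, PySem.List.enumerate_cons, List.filter_cons]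
  by_cases h : x = c
  · simp [h]
  · simp [h]

theorem pvFoldl_add_eq (l acc : List Int) :
    l.foldl PySem.Set.add acc = acc ++ (pvFo l).filter (fun y => !(acc.contains y)) := by
  induction l generalizing acc with
  | nil => simp [pvFo]
  | cons x xs ih =>
    simp only [List.foldl_cons, PySem.Set.add, PySem.Set.contains, pvFo]
    by_cases hx : acc.contains x
    · have hxm : x ∈ acc := by simpa using hx
      rw [if_pos hx, ih]
      congr 1
      rw [List.filter_cons]
      have hnx : (!acc.contains x) = false := by simpa using hxm
      rw [hnx, if_neg (by simp), List.filter_filter]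
      apply List.filter_congr
      intro y hy
      by_cases hay : y ∈ acc
      · simp [hay]
      · have hyx : (y != x) = true := by
          rw [bne_iff_ne]
          intro h; exact hay (h ▸ hxm)
        simp [hay, hyx]
    · have hxm : x ∉ acc := by simpa using hx
      rw [if_neg hx, ih]
      rw [List.filter_cons]
      have hnx : (!acc.contains x) = true := by simpa using hxm
      rw [hnx, if_pos rfl]
      simp only [List.append_assoc, List.singleton_append]
      congr 2
      rw [List.filter_filter]
      apply List.filter_congr
      intro y hy
      rw [List.contains_append]
      by_cases hxy : y = x
      · subst hxy
        simp
      · have h2 : (y != x) = true := by rw [bne_iff_ne]; exact hxy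
        simp [h2, hxy]

theorem pvOfList_eq_fo (l : List Int) : PySem.Set.ofList l = pvFo l := by
  have := pvFoldl_add_eq l []
  simpa [PySem.Set.ofList, PySem.Set.empty] using this

theorem pvMem_fo {y : Int} {l : List Int} (h : y ∈ pvFo l) : y ∈ l := by
  induction l with
  | nil => simp [pvFo] at h
  | cons x xs ih =>
    simp only [pvFo, List.mem_cons] at h
    rcases h with h | h
    · simp [h]
    · exact List.mem_cons_of_mem _ (ih (List.mem_of_mem_filter h))

theorem pvFo_pairwise_idxOf (l : List Int) :
    (pvFo l).Pairwise (fun a b => l.idxOf a < l.idxOf b) := by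
  induction l with
  | nil => simp [pvFo]
  | cons x xs ih =>
    simp only [pvFo]
    constructor
    · intro b hb
      have hbx : b ≠ x := by
        have := List.of_mem_filter hb
        simpa [bne_iff_ne] using this
      simp [Ne.symm hbx]
    · have hsub : ((pvFo xs).filter (fun y => y != x)).Pairwise
          (fun a b => xs.idxOf a < xs.idxOf b) :=
        ih.sublist List.filter_sublist
      refine hsub.imp_of_mem ?_
      intro a b ha hb hlt
      have hax : a ≠ x := by simpa [bne_iff_ne] using List.of_mem_filter ha
      have hbx : b ≠ x := by simpa [bne_iff_ne] using List.of_mem_filter hb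
      simp [Ne.symm hax, Ne.symm hbx]
      omega

theorem pvOcc_head (c : Int) (l : List Int) (s : Int) (h : c ∈ l) :
    ∃ t, pvOcc c l s = (s + (l.idxOf c : Int)) :: t := by
  induction l generalizing s with
  | nil => simp at h
  | cons x xs ih =>
    rw [pvOcc_cons]
    by_cases hx : x = c
    · refine ⟨pvOcc c xs (s+1), ?_⟩
      simp [hx]
    · have hc : c ∈ xs := by
        rcases List.mem_cons.mp h with h' | h'
        · exact absurd h'.symm hx
        · exact h'
      obtain ⟨t, ht⟩ := ih (s+1) hc
      refine ⟨t, ?_⟩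
      rw [if_neg hx, ht]
      have : (x :: xs).idxOf c = xs.idxOf c + 1 := by
        simp [hx]
      rw [this]
      push_cast
      ring_nf

theorem pvOcc_lt (labels : List Int) (a b : Int) (ha : a ∈ labels) (hb : b ∈ labels)
    (h : labels.idxOf a < labels.idxOf b) : pvOcc a labels 0 < pvOcc b labels 0 := by
  obtain ⟨ta, hta⟩ := pvOcc_head a labels 0 ha
  obtain ⟨tb, htb⟩ := pvOcc_head b labels 0 hb
  rw [hta, htb, List.cons_lt_cons_iff]
  left
  omega

theorem pvEnumerate_map {α β : Type} (f : α → β) (l : List α) (s : Int) :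
    PySem.List.enumerate (l.map f) s = (PySem.List.enumerate l s).map (fun p => (p.1, f p.2)) := by
  induction l generalizing s with
  | nil => simp [PySem.List.enumerate]
  | cons x xs ih => simp [PySem.List.enumerate_cons, ih]

-- the dict built by A's grouping loop
def pvDictA (labels : List Int) : PySem.Dict Int (List Int) :=
  (PySem.List.enumerate labels).foldl
    (fun d p => d.modify p.2 [] (fun xs => xs ++ [p.1])) PySem.Dict.empty

theorem pvDictA_getD (labels : List Int) (c : Int) :
    (pvDictA labels).getD c [] = pvOcc c labels 0 := by
  unfold pvDictA
  have hfold : (PySem.List.enumerate labels).foldl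
      (fun d p => d.modify p.2 [] (fun xs => xs ++ [p.1]))
      (PySem.Dict.empty : PySem.Dict Int (List Int))
      = ((PySem.List.enumerate labels).map Prod.swap).foldl
        (fun d q => d.modify q.1 [] (fun xs => xs ++ [q.2])) PySem.Dict.empty := by
    rw [List.foldl_map]
    simp only [Prod.fst_swap, Prod.snd_swap]
  rw [hfold, PySem.Dict.getD_foldl_modify_append]
  simp only [PySem.Dict.getD_empty, List.nil_append, pvOcc, List.filter_map, List.map_map]
  simp [Function.comp_def]

theorem pvDictA_keys (labels : List Int) : (pvDictA labels).keys = pvFo labels := by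
  unfold pvDictA
  rw [PySem.Dict.keys_foldl_modify_key]
  rw [PySem.List.map_snd_enumerate]
  rw [← pvOfList_eq_fo]
  simp [PySem.Set.update, PySem.Set.ofList, PySem.Set.empty]

theorem pvDictA_nodup_keys (labels : List Int) : (pvDictA labels).keys.Nodup := by
  unfold pvDictA
  exact PySem.Dict.nodup_keys_foldl_modify_key _ _ _ _ _ (by simp)

theorem pvDictA_items (labels : List Int) :
    (pvDictA labels).items = (pvFo labels).map (fun k => (k, pvOcc k labels 0)) := by
  rw [PySem.Dict.items_eq_map_keys _ (pvDictA_nodup_keys labels) []]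
  rw [pvDictA_keys]
  apply List.map_congr_left
  intro k _
  rw [pvDictA_getD]

theorem pvSorted_items (labels : List Int) :
    PySem.List.sorted (pvDictA labels).items (fun x => x.2) false = (pvDictA labels).items := by
  have h : ((pvDictA labels).items).Pairwise (fun a b => a.2 < b.2) := by
    rw [pvDictA_items, List.pairwise_map]
    refine (pvFo_pairwise_idxOf labels).imp_of_mem ?_
    intro a b ha hb hlt
    exact pvOcc_lt labels a b (pvMem_fo ha) (pvMem_fo hb) hlt
  convert PySem.List.sorted_eq_of_perm_of_pairwise_lt ((pvDictA labels).items)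
    ((pvDictA labels).items) (fun x => x.2) (List.Perm.refl _) h using 2

-- B's loop: its dict component equals A's dict, its order component equals A's keys
theorem pvB_fold (l : List (Int × Int)) (d : PySem.Dict Int (List Int)) (ord : List Int)
    (hord : ord = d.keys) :
    l.foldl (fun (st : PySem.Dict Int (List Int) × List Int) p =>
        if st.1.contains p.2 then
          (st.1.modify p.2 [] (fun xs => xs ++ [p.1]), st.2)
        else
          (st.1.insert p.2 [p.1], st.2 ++ [p.2])) (d, ord)
      = (l.foldl (fun d p => d.modify p.2 [] (fun xs => xs ++ [p.1])) d,
         (l.foldl (fun d p => d.modify p.2 [] (fun xs => xs ++ [p.1])) d).keys) := by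
  induction l generalizing d ord with
  | nil => simp [hord]
  | cons p l ih =>
    simp only [List.foldl_cons]
    by_cases hc : d.contains p.2
    · rw [if_pos hc]
      apply ih
      rw [PySem.Dict.keys_modify, PySem.Dict.keys_insert_of_contains _ _ hc, hord]
    · rw [if_neg (by simp [hc])]
      have hnc : d.contains p.2 = false := by simp [hc]
      have hins : d.insert p.2 [p.1] = d.modify p.2 [] (fun xs => xs ++ [p.1]) := by
        simp [PySem.Dict.modify, PySem.Dict.getD_of_not_contains d [] hnc]
      rw [hins]
      apply ih
      rw [← hins, PySem.Dict.keys_insert_of_not_contains d [p.1] hnc, hord]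

-- ===== VERDICT (by name: the statement is the Claim_ definition above) =====
theorem renumber_clustering_py_spec : Claim_equal_renumber_clustering_py := by
  intro labels _
  unfold Spec_renumber_clustering_py renumber_clustering_py renumber_clustering_py_alt
  simp only
  rw [pvB_fold _ _ _ (by simp)]
  show (PySem.List.enumerate (PySem.List.sorted (pvDictA labels).items (fun x => x.2) false)).map
        (fun p => (p.1, p.2.2))
      = (PySem.List.enumerate (pvDictA labels).keys).map (fun p => (p.1, (pvDictA labels).getD p.2 []))
  rw [pvSorted_items, pvDictA_items, pvDictA_keys, pvEnumerate_map, List.map_map]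
  apply List.map_congr_left
  intro p _
  simp [pvDictA_getD]
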